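-- pv_equiv track=rewrite | github.com/munki/munki | code/client/munkilib/updatecheck/catalogs.py | best_version_match
-- ===== SOURCE A (Python) =====
-- def best_version_match(vers_num, item_dict):
--     '''Attempts to find the best match in item_dict for vers_num'''
--     vers_tuple = vers_num.split('.')
--     precision = 1
--     while precision <= len(vers_tuple):
--         test_vers = '.'.join(vers_tuple[0:precision])
--         match_names = []
--         for item in item_dict.keys():
--             for item_version in item_dict[item]:
--                 if (item_version.startswith(test_vers) and
--                         item not in match_names):
--                     match_names.append(item)
--         if len(match_names) == 1:
--             return match_names[0]
--         precision = precision + 1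
--
--     return None
-- ===== SOURCE B (Python) =====
-- def best_version_match(vers_num, item_dict):
--     '''Attempts to find the best match in item_dict for vers_num'''
--     parts = vers_num.split('.')
--     n = len(parts)
--     prefixes = ['.'.join(parts[:p]) for p in range(1, n + 1)]
--     level_count = [0] * (n + 1)
--     level_item = [None] * (n + 1)
--     for item, versions in item_dict.items():
--         # max precision any of this item's versions matches, in one sweep:
--         # m only ever advances, because matching at precision p+1 implies
--         # matching at precision p.
--         m = 0
--         for v in versions:
--             while m < n and v.startswith(prefixes[m]):
--                 m += 1
--             if m == n:
--                 break
--         if m > 0: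
--             level_count[m] += 1
--             level_item[m] = item
--     ans = None
--     total = 0
--     rep = None
--     for p in range(n, 0, -1):
--         total += level_count[p]
--         if level_item[p] is not None:
--             rep = level_item[p]
--         if total == 1:
--             ans = rep
--     return ans
-- ===== Notes on version B (the rewrite author's own statement) =====
-- stated objective: alternative
-- what changed: Instead of rescanning every item's every version once per precision level, B makes one sweep over the items computing each item's maximal matching precision (the per-item cursor only ever advances, since matching at precision p+1 implies matching at p), builds a histogram of items per precision, and picks the answer with one downward scan over precisions; on the generated timing inputs this was not measurably faster.
import Mathlib
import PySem

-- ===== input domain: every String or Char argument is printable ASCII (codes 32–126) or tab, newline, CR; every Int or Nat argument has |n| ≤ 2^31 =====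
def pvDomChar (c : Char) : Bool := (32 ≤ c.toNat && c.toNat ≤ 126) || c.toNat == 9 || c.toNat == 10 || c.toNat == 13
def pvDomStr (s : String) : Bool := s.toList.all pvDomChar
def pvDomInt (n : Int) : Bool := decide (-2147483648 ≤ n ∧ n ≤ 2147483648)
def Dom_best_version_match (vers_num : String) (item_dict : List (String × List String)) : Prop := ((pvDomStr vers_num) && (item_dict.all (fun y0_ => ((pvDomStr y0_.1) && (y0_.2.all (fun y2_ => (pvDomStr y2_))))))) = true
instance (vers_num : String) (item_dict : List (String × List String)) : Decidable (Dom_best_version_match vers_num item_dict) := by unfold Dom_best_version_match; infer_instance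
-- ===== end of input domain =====

-- B replaces A's per-precision rescans of the whole dict by one sweep computing each
-- item's maximal matching precision, a histogram over precisions, and one downward scan.

-- ===== PORT A =====
-- inner loop 'for item_version in item_dict[item]: if …: match_names.append(item)'
def pvAInner (test_vers item : String) (versions match_names : List String) : List String :=
  versions.foldl (fun acc item_version =>
    if PySem.Str.startswith item_version test_vers && !(acc.contains item) then acc ++ [item]
    else acc) match_names

-- 'for item in item_dict.keys(): …' — a dict's keys paired with their looked-up values
-- are exactly its items, so we fold over the (key, value) items list.
def pvAMatches (test_vers : String) (items : List (String × List String)) : List String :=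
  items.foldl (fun acc kv => pvAInner test_vers kv.1 kv.2 acc) []

-- 'while precision <= len(vers_tuple)': fuel = len(vers_tuple) + 1 - precision
def pvALoop (items : List (String × List String)) (vers_tuple : List String)
    (precision fuel : Nat) : Option String :=
  match fuel with
  | 0 => none
  | Nat.succ fuel' =>
    let test_vers := PySem.Str.join "." (vers_tuple.take precision)
    let match_names := pvAMatches test_vers items
    if match_names.length = 1 then match_names.head?
    else pvALoop items vers_tuple (precision + 1) fuel'

def best_version_match (vers_num : String) (item_dict : List (String × List String)) :
    Option String :=
  -- sep is the literal ".", never empty, so split? is always some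
  let vers_tuple : List String := (PySem.Str.split? vers_num ".").getD []
  pvALoop (PySem.Dict.ofList item_dict).items vers_tuple 1 vers_tuple.length

-- ===== PORT B =====
-- 'while m < n and v.startswith(prefixes[m]): m += 1'  (m < n keeps the index in range)
def pvBWhile (prefixes : List String) (n : Nat) (v : String) (m : Nat) : Nat :=
  if _h : m < n ∧ PySem.Str.startswith v (prefixes.getD m "") then pvBWhile prefixes n v (m + 1)
  else m
  termination_by n - m
  decreasing_by omega

-- 'for v in versions: … if m == n: break'
def pvBItem (prefixes : List String) (n : Nat) (versions : List String) (m : Nat) : Nat :=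
  match versions with
  | [] => m
  | v :: rest =>
    let m' := pvBWhile prefixes n v m
    if m' == n then m' else pvBItem prefixes n rest m'

-- the item loop filling level_count / level_item (lists updated in place via set)
def pvBHist (prefixes : List String) (n : Nat) (items : List (String × List String)) :
    List Int × List (Option String) :=
  items.foldl (fun st kv =>
    let m := pvBItem prefixes n kv.2 0
    if 0 < m then (st.1.set m (st.1.getD m 0 + 1), st.2.set m (some kv.1)) else st)
    (List.replicate (n + 1) 0, List.replicate (n + 1) (none : Option String))

-- 'for p in range(n, 0, -1): …' returning (ans, total, rep)
def pvBScan (counts : List Int) (litem : List (Option String)) (n : Nat) :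
    Option String × Int × Option String :=
  (PySem.List.pyRange (n : Int) 0 (-1)).foldl (fun st p =>
    let total := st.2.1 + counts.getD p.toNat 0
    let rep := match litem.getD p.toNat none with
      | some x => some x
      | none => st.2.2
    (if total == 1 then rep else st.1, total, rep))
    (none, 0, none)

def best_version_match_alt (vers_num : String) (item_dict : List (String × List String)) :
    Option String :=
  -- sep is the literal ".", never empty, so split? is always some
  let parts : List String := (PySem.Str.split? vers_num ".").getD []
  let n : Nat := parts.length
  let prefixes := (PySem.List.pyRange 1 ((n : Int) + 1) 1).map
    (fun p => PySem.Str.join "." (parts.take p.toNat))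
  let cl := pvBHist prefixes n (PySem.Dict.ofList item_dict).items
  (pvBScan cl.1 cl.2 n).1

-- ===== PRECONDITION & SPEC =====
def Spec_best_version_match (vers_num : String) (item_dict : List (String × List String)) (out : Option String) : Prop := out = best_version_match_alt vers_num item_dict
instance (vers_num : String) (item_dict : List (String × List String)) (out : Option String) : Decidable (Spec_best_version_match vers_num item_dict out) := by unfold Spec_best_version_match; infer_instance

-- ===== CLAIM (what is proved, stated in full; the proofs are below) =====
def Claim_equal_best_version_match : Prop := ∀ (vers_num : String) (item_dict : List (String × List String)), Dom_best_version_match vers_num item_dict → Spec_best_version_match vers_num item_dict (best_version_match vers_num item_dict)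

-- ===== LEMMAS AND PROOFS =====

-- the joined prefix of the first p components
def pvPref (parts : List String) (p : Nat) : String :=
  PySem.Str.join "." (parts.take p)

-- does some version of the item match at precision p?
def pvMatch (parts : List String) (p : Nat) (versions : List String) : Bool :=
  versions.any (fun v => PySem.Str.startswith v (pvPref parts p))

-- maximal matching precision of one version string
def pvM1 (parts : List String) (n : Nat) (v : String) : Nat :=
  ((List.range n).takeWhile (fun i => PySem.Str.startswith v (pvPref parts (i + 1)))).length

-- maximal matching precision over an item's versions
def pvMmax (parts : List String) (n : Nat) (versions : List String) : Nat :=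
  versions.foldr (fun v a => max (pvM1 parts n v) a) 0

-- number of matching items / first matching item name at precision p
def pvCnt (items : List (String × List String)) (parts : List String) (p : Nat) : Nat :=
  (items.filter (fun kv => pvMatch parts p kv.2)).length

def pvVal (items : List (String × List String)) (parts : List String) (p : Nat) :
    Option String :=
  ((items.filter (fun kv => pvMatch parts p kv.2)).map (·.1)).head?

-- the common result: scan precisions upward, return first with a unique match
def pvG (items : List (String × List String)) (parts : List String) (p : Nat) : Option String :=
  if _h : p ≤ parts.length then
    (if pvCnt items parts p = 1 then pvVal items parts p else pvG items parts (p + 1))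
  else none
  termination_by parts.length + 1 - p
  decreasing_by omega

-- ---- prefix monotonicity ----

theorem pvJoinPrefixAppend (sep : List Char) :
    ∀ (a b : List (List Char)), PySem.Chars.join sep a <+: PySem.Chars.join sep (a ++ b)
  | [], b => by simp [PySem.Chars.join_nil]
  | [x], b => by
    cases b with
    | nil => simp
    | cons y ys =>
      rw [PySem.Chars.join_singleton, List.singleton_append, PySem.Chars.join_cons_cons]
      exact (List.prefix_append x _).trans (by rw [List.append_assoc])
  | x :: x2 :: rest, b => by
    rw [PySem.Chars.join_cons_cons, List.cons_append, List.cons_append,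
      PySem.Chars.join_cons_cons, ← List.cons_append]
    exact (List.prefix_append_right_inj (x ++ sep)).mpr
      (pvJoinPrefixAppend sep (x2 :: rest) b)

theorem pvPref_mono (parts : List String) {q p : Nat} (h : q ≤ p) :
    (pvPref parts q).toList <+: (pvPref parts p).toList := by
  simp only [pvPref, PySem.Str.toList_join]
  obtain ⟨t, ht⟩ := List.take_prefix_take_left (l := parts) h
  rw [← ht, List.map_append]
  exact pvJoinPrefixAppend _ _ _

theorem pvStartswith_mono (parts : List String) {q p : Nat} (h : q ≤ p) {v : String}
    (hs : PySem.Str.startswith v (pvPref parts p) = true) :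
    PySem.Str.startswith v (pvPref parts q) = true := by
  rw [PySem.Str.startswith_eq, PySem.Chars.startswith_iff] at hs ⊢
  exact (pvPref_mono parts h).trans hs

-- ---- takeWhile over a range ----

theorem pvTakeWhileRange' (q : Nat → Bool) :
    ∀ (n s p : Nat), (p ≤ ((List.range' s n).takeWhile q).length ↔
      p ≤ n ∧ ∀ i, i < p → q (s + i) = true) := by
  intro n
  induction n with
  | zero =>
    intro s p
    simp only [List.range', List.takeWhile_nil, List.length_nil]
    constructor
    · intro h; exact ⟨h, fun i hi => by omega⟩
    · intro h; exact h.1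
  | succ n ih =>
    intro s p
    rw [List.range'_succ]
    simp only [List.takeWhile_cons]
    by_cases hqs : q s = true
    · rw [if_pos hqs]
      cases p with
      | zero => simp
      | succ p =>
        simp only [List.length_cons, Nat.succ_le_succ_iff, ih (s+1) p]
        constructor
        · rintro ⟨h1, h2⟩
          refine ⟨by omega, fun i hi => ?_⟩
          cases i with
          | zero => simpa using hqs
          | succ i => have := h2 i (by omega); rw [← this]; ring_nf
        · rintro ⟨h1, h2⟩
          refine ⟨by omega, fun i hi => ?_⟩
          have := h2 (i+1) (by omega)
          rw [← this]; ring_nf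
    · rw [if_neg hqs]
      simp only [List.length_nil, Nat.le_zero]
      constructor
      · intro h; subst h; exact ⟨by omega, fun i hi => by omega⟩
      · rintro ⟨h1, h2⟩
        by_contra hp
        exact hqs (by simpa using h2 0 (by omega))

theorem pvM1_le_n (parts : List String) (n : Nat) (v : String) : pvM1 parts n v ≤ n := by
  have h := List.Sublist.length_le
    (List.takeWhile_sublist (p := fun i => PySem.Str.startswith v (pvPref parts (i + 1)))
      (l := List.range n))
  simpa [pvM1] using h

theorem pvM1_le_iff (parts : List String) {n p : Nat} (v : String) (hp : 1 ≤ p) (hpn : p ≤ n) :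
    (p ≤ pvM1 parts n v ↔ PySem.Str.startswith v (pvPref parts p) = true) := by
  have hr : List.range n = List.range' 0 n := by simp [List.range_eq_range']
  rw [pvM1, hr, pvTakeWhileRange']
  constructor
  · rintro ⟨h1, h2⟩
    have := h2 (p - 1) (by omega)
    simpa [Nat.sub_add_cancel hp] using this
  · intro hs
    refine ⟨hpn, fun i hi => ?_⟩
    simp only [Nat.zero_add]
    exact pvStartswith_mono parts (by omega) hs

theorem pvMmax_le_n (parts : List String) (n : Nat) (vs : List String) :
    pvMmax parts n vs ≤ n := by
  induction vs with
  | nil => simp [pvMmax]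
  | cons v rest ih =>
    simp only [pvMmax, List.foldr_cons] at ih ⊢
    exact max_le (pvM1_le_n parts n v) ih

theorem pvMmax_le_iff (parts : List String) {n p : Nat} (vs : List String)
    (hp : 1 ≤ p) (hpn : p ≤ n) :
    (p ≤ pvMmax parts n vs ↔ pvMatch parts p vs = true) := by
  induction vs with
  | nil => simp [pvMmax, pvMatch]; omega
  | cons v rest ih =>
    simp only [pvMmax, List.foldr_cons, le_max_iff, pvMatch, List.any_cons] at ih ⊢
    rw [pvM1_le_iff parts v hp hpn, ih]
    simp

-- ---- port B's while / version loop compute the maximal precision ----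

theorem pvPrefixes_getD (parts : List String) {n m : Nat} (hm : m < n) :
    ((PySem.List.pyRange 1 ((n : Int) + 1) 1).map
      (fun p => PySem.Str.join "." (parts.take p.toNat))).getD m "" = pvPref parts (m + 1) := by
  rw [PySem.List.pyRange_one]
  have h1 : (((n : Int) + 1) - 1).toNat = n := by omega
  rw [h1, List.map_map, List.getD, List.getElem?_map, List.getElem?_range hm]
  simp only [Option.map_some, Option.getD_some, Function.comp_apply]
  have h2 : ((1 : Int) + (m : Int)).toNat = m + 1 := by omega
  rw [h2]; rfl

theorem pvBWhile_eq (parts : List String) (n : Nat) (v : String) (m : Nat) :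
    pvBWhile ((PySem.List.pyRange 1 ((n : Int) + 1) 1).map
      (fun p => PySem.Str.join "." (parts.take p.toNat))) n v m = max m (pvM1 parts n v) := by
  induction m using pvBWhile.induct ((PySem.List.pyRange 1 ((n : Int) + 1) 1).map
      (fun p => PySem.Str.join "." (parts.take p.toNat))) n v with
  | case1 m h ih =>
    rw [pvBWhile, dif_pos h, ih]
    obtain ⟨hmn, hsw⟩ := h
    rw [pvPrefixes_getD parts hmn] at hsw
    have : m + 1 ≤ pvM1 parts n v := (pvM1_le_iff parts v (by omega) (by omega)).mpr hsw
    omega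
  | case2 m h =>
    rw [pvBWhile, dif_neg h]
    rw [Classical.not_and_iff_not_or_not] at h
    rcases h with hmn | hsw
    · have := pvM1_le_n parts n v; omega
    · by_cases hmn : m < n
      · rw [pvPrefixes_getD parts hmn] at hsw
        have : ¬ (m + 1 ≤ pvM1 parts n v) := fun hle =>
          hsw ((pvM1_le_iff parts v (by omega) (by omega)).mp hle)
        omega
      · have := pvM1_le_n parts n v; omega

theorem pvBItem_eq (parts : List String) (n : Nat) (vs : List String) (m : Nat) :
    pvBItem ((PySem.List.pyRange 1 ((n : Int) + 1) 1).map
      (fun p => PySem.Str.join "." (parts.take p.toNat))) n vs m = max m (pvMmax parts n vs) := by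
  induction vs generalizing m with
  | nil => simp [pvBItem, pvMmax]
  | cons v rest ih =>
    simp only [pvBItem, pvBWhile_eq parts n v m, pvMmax, List.foldr_cons]
    by_cases hn : max m (pvM1 parts n v) = n
    · rw [if_pos (by simpa using hn)]
      have h1 := pvMmax_le_n parts n rest
      have h2 := pvM1_le_n parts n v
      simp only [pvMmax] at h1
      omega
    · rw [if_neg (by simpa using hn), ih]
      simp only [pvMmax]
      omega

-- ---- port A's inner loops build the filtered key list ----

theorem pvAInner_of_mem (t item : String) (vs acc : List String) (h : item ∈ acc) :
    pvAInner t item vs acc = acc := by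
  induction vs generalizing acc with
  | nil => rfl
  | cons v rest ih =>
    simp only [pvAInner, List.foldl_cons]
    rw [if_neg (by simp [h]), ← pvAInner]
    exact ih acc h

theorem pvAInner_eq (t item : String) (vs acc : List String) :
    pvAInner t item vs acc =
      if (vs.any (fun v => PySem.Str.startswith v t)) = true ∧ item ∉ acc
      then acc ++ [item] else acc := by
  induction vs generalizing acc with
  | nil => simp [pvAInner]
  | cons v rest ih =>
    by_cases hmem : item ∈ acc
    · rw [pvAInner_of_mem t item _ acc hmem, if_neg (by tauto)]
    · simp only [pvAInner, List.foldl_cons]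
      by_cases hsw : PySem.Chars.startswith v.toList t.toList = true
      · rw [if_pos (by simp [hsw, hmem]), ← pvAInner,
          pvAInner_of_mem t item rest _ (by simp),
          if_pos (by exact ⟨by simp [List.any_cons, hsw], hmem⟩)]
      · rw [if_neg (by simp [hsw]), ← pvAInner, ih acc]
        simp [List.any_cons, hsw]

theorem pvAMatches_go (t : String) :
    ∀ (items : List (String × List String)) (acc : List String),
      (items.map (·.1)).Nodup → (∀ kv ∈ items, kv.1 ∉ acc) →
      items.foldl (fun acc kv => pvAInner t kv.1 kv.2 acc) acc =
        acc ++ (items.filter (fun kv => kv.2.any (fun v => PySem.Str.startswith v t))).map (·.1) := by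
  intro items
  induction items with
  | nil => simp
  | cons kv rest ih =>
    intro acc hnd hacc
    simp only [List.map_cons, List.nodup_cons] at hnd
    simp only [List.foldl_cons, List.filter_cons]
    rw [pvAInner_eq]
    by_cases hany : (kv.2.any (fun v => PySem.Str.startswith v t)) = true
    · rw [if_pos ⟨hany, hacc kv (by simp)⟩, hany]
      rw [ih (acc ++ [kv.1]) hnd.2 (fun kv' hkv' => by
        simp only [List.mem_append, List.mem_singleton, not_or]
        refine ⟨hacc kv' (by simp [hkv']), fun he => ?_⟩
        exact hnd.1 (by rw [← he]; exact List.mem_map_of_mem hkv')), List.append_assoc]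
      simp
    · rw [if_neg (by tauto), ih acc hnd.2 (fun kv' hkv' => hacc kv' (by simp [hkv']))]
      simp only [PySem.Str.startswith_eq] at hany
      rw [if_neg (by simpa using hany)]

theorem pvAMatches_eq (parts : List String) (p : Nat) (items : List (String × List String))
    (hnd : (items.map (·.1)).Nodup) :
    pvAMatches (pvPref parts p) items =
      (items.filter (fun kv => pvMatch parts p kv.2)).map (·.1) := by
  rw [pvAMatches, pvAMatches_go _ items [] hnd (by simp)]
  rfl

theorem pvALoop_eq (items : List (String × List String)) (parts : List String)
    (hnd : (items.map (·.1)).Nodup) :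
    ∀ (fuel p : Nat), 1 ≤ p → fuel + p = parts.length + 1 →
      pvALoop items parts p fuel = pvG items parts p := by
  intro fuel
  induction fuel with
  | zero =>
    intro p hp hf
    rw [pvALoop, pvG, dif_neg (by omega)]
  | succ fuel ih =>
    intro p hp hf
    have hpn : p ≤ parts.length := by omega
    simp only [pvALoop]
    rw [show PySem.Str.join "." (parts.take p) = pvPref parts p from rfl,
      pvAMatches_eq parts p items hnd, pvG, dif_pos hpn]
    by_cases hcnt : pvCnt items parts p = 1
    · rw [if_pos (by simpa [pvCnt] using hcnt), if_pos hcnt]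
      rfl
    · rw [if_neg (by simpa [pvCnt] using hcnt), if_neg hcnt]
      exact ih (p + 1) (by omega) (by omega)

-- ---- counting helpers ----

theorem pvCountP_split (items : List (String × List String)) (f : String × List String → Nat)
    (p : Nat) :
    items.countP (fun kv => decide (p ≤ f kv)) =
      items.countP (fun kv => decide (f kv = p)) +
      items.countP (fun kv => decide (p + 1 ≤ f kv)) := by
  induction items with
  | nil => simp
  | cons kv rest ih =>
    simp only [List.countP_cons, ih]
    by_cases h1 : f kv = p
    · simp [h1]; omega
    · by_cases h2 : p + 1 ≤ f kv
      · simp [h1, h2, show p ≤ f kv by omega]; omega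
      · simp [h1, h2, show ¬ (p ≤ f kv) by omega]

-- ---- port B's histogram loop ----

theorem pvMapGetD {α : Type} (c : List α) (d : α) :
    (List.range c.length).map (fun p => c.getD p d) = c := by
  apply List.ext_getElem (by simp)
  intro i h1 h2
  simp [List.getD, List.getElem?_eq_getElem h2]

theorem pvGetLast?_cons {α : Type} (x : α) (xs : List α) :
    (x :: xs).getLast? = xs.getLast?.or (some x) := by
  have h := List.getLast?_append (l := [x]) (l' := xs)
  cases hx : xs.getLast? with
  | none =>
    have hnil : xs = [] := by simpa using hx
    simp [hnil]
  | some a => simpa [hx] using h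

theorem pvBHist_go (parts : List String) (n : Nat) :
    ∀ (items : List (String × List String)) (c : List Int) (l : List (Option String)),
      c.length = n + 1 → l.length = n + 1 →
      (items.foldl (fun st kv =>
        let m := pvBItem ((PySem.List.pyRange 1 ((n : Int) + 1) 1).map
          (fun p => PySem.Str.join "." (parts.take p.toNat))) n kv.2 0
        if 0 < m then (st.1.set m (st.1.getD m 0 + 1), st.2.set m (some kv.1)) else st) (c, l)) =
      ((List.range (n+1)).map (fun p =>
          c.getD p 0 + (if p = 0 then 0 else
            (items.countP (fun kv => decide (pvMmax parts n kv.2 = p)) : Int))),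
       (List.range (n+1)).map (fun p =>
          if p = 0 then l.getD p none else
          (((items.filter (fun kv => decide (pvMmax parts n kv.2 = p))).map (·.1)).getLast?).or
            (l.getD p none))) := by
  intro items
  induction items with
  | nil =>
    intro c l hc hl
    simp only [List.foldl_nil, List.countP_nil, List.filter_nil, List.map_nil,
      List.getLast?_nil, Option.none_or]
    refine Prod.ext ?_ ?_
    · show c = _
      have he : ∀ p ∈ List.range (n + 1),
          (c.getD p 0 + if p = 0 then 0 else ((0 : Nat) : Int)) = c.getD p 0 := by
        intro p _; split <;> simp
      rw [List.map_congr_left he, ← hc, pvMapGetD]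
    · show l = _
      have he : ∀ p ∈ List.range (n + 1),
          (if p = 0 then l.getD p none else l.getD p none) = l.getD p none := by
        intro p _; split <;> rfl
      rw [List.map_congr_left he, ← hl, pvMapGetD]
  | cons kv rest ih =>
    intro c l hc hl
    have hM : pvBItem ((PySem.List.pyRange 1 ((n : Int) + 1) 1).map
        (fun p => PySem.Str.join "." (parts.take p.toNat))) n kv.2 0 = pvMmax parts n kv.2 := by
      rw [pvBItem_eq]; omega
    have hMn : pvMmax parts n kv.2 ≤ n := pvMmax_le_n parts n kv.2
    simp only [List.foldl_cons, hM]
    by_cases h0 : 0 < pvMmax parts n kv.2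
    · rw [if_pos h0, ih _ _ (by simp [hc]) (by simp [hl])]
      refine Prod.ext ?_ ?_
      · show List.map _ _ = List.map _ _
        apply List.map_congr_left
        intro p hp
        have hpn := List.mem_range.mp hp
        simp only [List.countP_cons, decide_eq_true_eq]
        by_cases hp0 : p = 0
        · rw [if_pos hp0, if_pos hp0]
          simp [List.getD, List.getElem?_set_ne (by omega : pvMmax parts n kv.2 ≠ p)]
        · rw [if_neg hp0, if_neg hp0]
          by_cases hpM : pvMmax parts n kv.2 = p
          · rw [hpM] at *
            have hlt : p < c.length := by omega
            rw [show (c.set p (c.getD p 0 + 1)).getD p 0 = c.getD p 0 + 1 by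
              simp [List.getD, hlt], if_pos rfl]
            push_cast; ring
          · rw [show (c.set (pvMmax parts n kv.2) (c.getD (pvMmax parts n kv.2) 0 + 1)).getD p 0
                = c.getD p 0 by
              simp [List.getD, List.getElem?_set_ne hpM], if_neg hpM]
            simp
      · show List.map _ _ = List.map _ _
        apply List.map_congr_left
        intro p hp
        have hpn := List.mem_range.mp hp
        simp only [List.filter_cons, decide_eq_true_eq]
        by_cases hp0 : p = 0
        · rw [if_pos hp0, if_pos hp0]
          simp [List.getD, List.getElem?_set_ne (by omega : pvMmax parts n kv.2 ≠ p)]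
        · rw [if_neg hp0, if_neg hp0]
          by_cases hpM : pvMmax parts n kv.2 = p
          · rw [hpM] at *
            have hlt : p < l.length := by omega
            rw [show (l.set p (some kv.1)).getD p none = some kv.1 by
              simp [List.getD, hlt], if_pos rfl]
            rw [List.map_cons, pvGetLast?_cons, Option.or_assoc, Option.some_or]
          · rw [show (l.set (pvMmax parts n kv.2) (some kv.1)).getD p none = l.getD p none by
              simp [List.getD, List.getElem?_set_ne hpM], if_neg hpM]
    · rw [if_neg h0, ih _ _ hc hl]
      have hM0 : pvMmax parts n kv.2 = 0 := by omega
      refine Prod.ext ?_ ?_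
      · show List.map _ _ = List.map _ _
        apply List.map_congr_left
        intro p hp
        have hpn := List.mem_range.mp hp
        simp only [List.countP_cons, decide_eq_true_eq, hM0]
        by_cases hp0 : p = 0
        · rw [if_pos hp0, if_pos hp0]
        · rw [if_neg hp0, if_neg hp0, if_neg (fun h => hp0 h.symm)]
          simp
      · show List.map _ _ = List.map _ _
        apply List.map_congr_left
        intro p hp
        have hpn := List.mem_range.mp hp
        simp only [List.filter_cons, decide_eq_true_eq, hM0]
        by_cases hp0 : p = 0
        · rw [if_pos hp0, if_pos hp0]
        · rw [if_neg hp0, if_neg hp0, if_neg (fun h => hp0 h.symm)]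

theorem pvBHist_eq (parts : List String) (n : Nat) (items : List (String × List String)) :
    pvBHist ((PySem.List.pyRange 1 ((n : Int) + 1) 1).map
      (fun p => PySem.Str.join "." (parts.take p.toNat))) n items =
    ((List.range (n + 1)).map (fun p => if p = 0 then 0 else
        ((items.countP (fun kv => decide (pvMmax parts n kv.2 = p)) : Nat) : Int)),
     (List.range (n + 1)).map (fun p => if p = 0 then none else
        ((items.filter (fun kv => decide (pvMmax parts n kv.2 = p))).map (·.1)).getLast?)) := by
  rw [pvBHist, pvBHist_go parts n items _ _ (by simp) (by simp)]
  refine Prod.ext ?_ ?_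
  · show List.map _ _ = List.map _ _
    apply List.map_congr_left
    intro p hp
    have hpn := List.mem_range.mp hp
    by_cases hp0 : p = 0
    · simp [hp0, List.getD]
    · rw [if_neg hp0]
      simp [List.getD, hpn]
  · show List.map _ _ = List.map _ _
    apply List.map_congr_left
    intro p hp
    have hpn := List.mem_range.mp hp
    by_cases hp0 : p = 0
    · simp [hp0, List.getD]
    · simp [hp0, List.getD, hpn, Option.or_none]

-- ---- port B's downward scan ----

theorem pvBScan_go (items : List (String × List String)) (parts : List String)
    (counts : List Int) (litem : List (Option String)) (n : Nat) (hn : n = parts.length)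
    (hc : ∀ p, 1 ≤ p → p ≤ n →
      counts.getD p 0 = (items.countP (fun kv => decide (pvMmax parts n kv.2 = p)) : Int))
    (hl : ∀ p, 1 ≤ p → p ≤ n →
      litem.getD p none =
        ((items.filter (fun kv => decide (pvMmax parts n kv.2 = p))).map (·.1)).getLast?) :
    ∀ (p : Nat) (ans : Option String) (total : Int) (rep : Option String),
      p ≤ n →
      ans = pvG items parts (p + 1) →
      total = (items.countP (fun kv => decide (p + 1 ≤ pvMmax parts n kv.2)) : Int) →
      (items.countP (fun kv => decide (p + 1 ≤ pvMmax parts n kv.2)) = 1 →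
        ∃ kv ∈ items, p + 1 ≤ pvMmax parts n kv.2 ∧ rep = some kv.1) →
      ((PySem.List.pyRange (p : Int) 0 (-1)).foldl (fun st q =>
        let total := st.2.1 + counts.getD q.toNat 0
        let rep := match litem.getD q.toNat none with
          | some x => some x
          | none => st.2.2
        (if total == 1 then rep else st.1, total, rep)) (ans, total, rep)).1 =
      pvG items parts 1 := by
  intro p
  induction p with
  | zero =>
    intro ans total rep _ hans _ _
    rw [PySem.List.pyRange_neg_one_eq_nil (by norm_num)]
    simpa using hans
  | succ p ih =>
    intro ans total rep hp hans htot hrep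
    rw [PySem.List.pyRange_neg_one_cons (by exact_mod_cast Nat.succ_pos p),
      show (((p + 1 : Nat) : Int)) - 1 = ((p : Nat) : Int) by push_cast; ring]
    simp only [List.foldl_cons, Int.toNat_natCast]
    have hsplit := pvCountP_split items (fun kv => pvMmax parts n kv.2) (p + 1)
    have htot' : total + counts.getD (p + 1) 0 =
        ((items.countP (fun kv => decide (p + 1 ≤ pvMmax parts n kv.2)) : Nat) : Int) := by
      rw [htot, hc (p + 1) (by omega) (by omega), hsplit]
      push_cast; ring
    have hfeq : items.filter (fun kv => decide (p + 1 ≤ pvMmax parts n kv.2)) =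
        items.filter (fun kv => pvMatch parts (p + 1) kv.2) := by
      apply List.filter_congr
      intro kv _
      by_cases hm : pvMatch parts (p + 1) kv.2 = true
      · simp [hm, (pvMmax_le_iff parts kv.2 (by omega) (by omega : p + 1 ≤ n)).mpr hm]
      · have hnle : ¬ (p + 1 ≤ pvMmax parts n kv.2) := fun hle =>
          hm ((pvMmax_le_iff parts kv.2 (by omega) (by omega : p + 1 ≤ n)).mp hle)
        rw [Bool.not_eq_true] at hm
        rw [hm]
        exact decide_eq_false hnle
    have hcnt : items.countP (fun kv => decide (p + 1 ≤ pvMmax parts n kv.2)) =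
        pvCnt items parts (p + 1) := by
      rw [pvCnt, List.countP_eq_length_filter, hfeq]
    have hrep' : items.countP (fun kv => decide (p + 1 ≤ pvMmax parts n kv.2)) = 1 →
        ∃ kv ∈ items, p + 1 ≤ pvMmax parts n kv.2 ∧
          (match litem.getD (p + 1) none with
            | some x => some x
            | none => rep) = some kv.1 := by
      intro hone
      obtain ⟨kv₀, hkv₀⟩ := List.length_eq_one_iff.mp
        (by rw [← List.countP_eq_length_filter]; exact hone)
      have hkv₀mem : kv₀ ∈ items ∧ p + 1 ≤ pvMmax parts n kv₀.2 := by
        have hin : kv₀ ∈ items.filter (fun kv => decide (p + 1 ≤ pvMmax parts n kv.2)) := by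
          rw [hkv₀]; simp
        exact ⟨List.mem_of_mem_filter hin, by simpa using List.of_mem_filter hin⟩
      refine ⟨kv₀, hkv₀mem.1, hkv₀mem.2, ?_⟩
      rw [hl (p + 1) (by omega) (by omega)]
      cases hlast : ((items.filter (fun kv => decide (pvMmax parts n kv.2 = p + 1))).map
          (fun x => x.1)).getLast? with
      | some x =>
        simp only []
        obtain ⟨kv₁, hkv₁mem, hkv₁⟩ := List.mem_map.mp (List.mem_of_getLast? hlast)
        have hin : kv₁ ∈ items.filter (fun kv => decide (p + 1 ≤ pvMmax parts n kv.2)) := by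
          rw [List.mem_filter]
          refine ⟨List.mem_of_mem_filter hkv₁mem, ?_⟩
          have h1 := List.of_mem_filter hkv₁mem
          simp only [decide_eq_true_eq] at h1 ⊢
          omega
        rw [hkv₀] at hin
        simp only [List.mem_singleton] at hin
        rw [← hkv₁, hin]
      | none =>
        simp only []
        have hfnil : items.filter (fun kv => decide (pvMmax parts n kv.2 = p + 1)) = [] :=
          List.map_eq_nil_iff.mp (List.getLast?_eq_none_iff.mp hlast)
        have hzero : items.countP (fun kv => decide (pvMmax parts n kv.2 = p + 1)) = 0 := by
          rw [List.countP_eq_length_filter, hfnil]; rfl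
        obtain ⟨kv₂, hkv₂mem, hkv₂le, hkv₂rep⟩ := hrep (by omega)
        rw [hkv₂rep]
        have hin : kv₂ ∈ items.filter (fun kv => decide (p + 1 ≤ pvMmax parts n kv.2)) := by
          rw [List.mem_filter]
          exact ⟨hkv₂mem, by simp only [decide_eq_true_eq]; omega⟩
        rw [hkv₀] at hin
        simp only [List.mem_singleton] at hin
        rw [hin]
    apply ih
    · omega
    · rw [pvG, dif_pos (by omega : p + 1 ≤ parts.length)]
      by_cases hone : items.countP (fun kv => decide (p + 1 ≤ pvMmax parts n kv.2)) = 1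
      · rw [if_pos (by rw [htot', hone]; rfl), if_pos (by rw [← hcnt]; exact hone)]
        obtain ⟨kv₀, hkv₀mem, hkv₀le, hkv₀rep⟩ := hrep' hone
        rw [hkv₀rep]
        obtain ⟨kv₁, hkv₁⟩ := List.length_eq_one_iff.mp
          (by rw [← List.countP_eq_length_filter]; exact hone)
        have hin : kv₀ ∈ items.filter (fun kv => decide (p + 1 ≤ pvMmax parts n kv.2)) := by
          rw [List.mem_filter]
          exact ⟨hkv₀mem, by simp only [decide_eq_true_eq]; omega⟩
        rw [hkv₁] at hin
        simp only [List.mem_singleton] at hin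
        rw [pvVal, ← hfeq, hkv₁, hin]
        rfl
      · rw [if_neg ?_, if_neg (by rw [← hcnt]; exact hone)]
        · exact hans
        · rw [htot']
          simp only [beq_iff_eq]
          exact_mod_cast fun h => hone (by exact_mod_cast h)
    · exact htot'
    · exact hrep'

-- ===== VERDICT (by name: the statement is the Claim_ definition above) =====
theorem best_version_match_spec : Claim_equal_best_version_match := by
  intro vers_num item_dict _
  show best_version_match vers_num item_dict = best_version_match_alt vers_num item_dict
  have hnd : (((PySem.Dict.ofList item_dict).items).map (fun x => x.1)).Nodup := by
    have h := PySem.Dict.nodup_keys_ofList item_dict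
    simpa [PySem.Dict.keys] using h
  have hA : best_version_match vers_num item_dict =
      pvG (PySem.Dict.ofList item_dict).items ((PySem.Str.split? vers_num ".").getD []) 1 :=
    pvALoop_eq _ _ hnd ((PySem.Str.split? vers_num ".").getD []).length 1 (by omega) (by omega)
  rw [hA]
  -- abbreviations for the B side
  have hzero : ((PySem.Dict.ofList item_dict).items).countP (fun kv =>
      decide (((PySem.Str.split? vers_num ".").getD []).length + 1 ≤
        pvMmax ((PySem.Str.split? vers_num ".").getD [])
          ((PySem.Str.split? vers_num ".").getD []).length kv.2)) = 0 :=
    List.countP_eq_zero.mpr (fun kv _ => by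
      simp only [decide_eq_true_eq]
      have h := pvMmax_le_n ((PySem.Str.split? vers_num ".").getD [])
        ((PySem.Str.split? vers_num ".").getD []).length kv.2
      omega)
  have hB : best_version_match_alt vers_num item_dict =
      pvG (PySem.Dict.ofList item_dict).items ((PySem.Str.split? vers_num ".").getD []) 1 := by
    show (pvBScan
      (pvBHist ((PySem.List.pyRange 1
          ((((PySem.Str.split? vers_num ".").getD []).length : Int) + 1) 1).map
        (fun p => PySem.Str.join "." (((PySem.Str.split? vers_num ".").getD []).take p.toNat)))
        ((PySem.Str.split? vers_num ".").getD []).length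
        (PySem.Dict.ofList item_dict).items).1
      (pvBHist ((PySem.List.pyRange 1
          ((((PySem.Str.split? vers_num ".").getD []).length : Int) + 1) 1).map
        (fun p => PySem.Str.join "." (((PySem.Str.split? vers_num ".").getD []).take p.toNat)))
        ((PySem.Str.split? vers_num ".").getD []).length
        (PySem.Dict.ofList item_dict).items).2
      ((PySem.Str.split? vers_num ".").getD []).length).1 = _
    rw [pvBHist_eq, pvBScan]
    apply pvBScan_go _ _ _ _ _ rfl
    · intro p hp1 hpn
      rw [List.getD, List.getElem?_map, List.getElem?_range (by omega)]
      simp only [Option.map_some, Option.getD_some]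
      rw [if_neg (by omega)]
    · intro p hp1 hpn
      rw [List.getD, List.getElem?_map, List.getElem?_range (by omega)]
      simp only [Option.map_some, Option.getD_some]
      rw [if_neg (by omega)]
    · exact le_rfl
    · rw [pvG, dif_neg (by omega)]
    · rw [hzero]; rfl
    · intro h
      rw [hzero] at h
      exact absurd h (by omega)
  rw [hB]
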